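-- pv_equiv track=rewrite | github.com/nermadie/CodeForces_Solutions | CodeforcesRound968Div2/prob03.py | solve
-- ===== SOURCE A (Python) =====
-- def solve(n, s):
--     result = ""
--     dict_char = {}
--     for char in s:
--         dict_char.setdefault(char, 0)
--         dict_char[char] += 1
--     list_char = [[k, v] for k, v in dict_char.items()]
--     list_char.sort(key=lambda x: x[1])
--     temp_string = "".join([x[0] for x in list_char])
--     cur_count = 0
--     for i in range(len(list_char)):
--         cur_print = list_char[i][1] - cur_count
--         cur_count = list_char[i][1]
--         result += temp_string * cur_print
--         temp_string = temp_string[1:]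
--     return result
-- ===== SOURCE B (Python) =====
-- def solve(n, s):
--     counts = {}
--     for ch in s:
--         counts[ch] = counts.get(ch, 0) + 1
--     pairs = sorted(counts.items(), key=lambda kv: kv[1])
--     maxc = pairs[-1][1] if pairs else 0
--     out = []
--     for r in range(maxc):
--         for ch, c in pairs:
--             if c > r:
--                 out.append(ch)
--     return "".join(out)
-- ===== Notes on version B (the rewrite author's own statement) =====
-- stated objective: simpler
-- what changed: B counts with get+insert, reads the max count off the end of the ascending-sorted pair list, and emits the output row-by-row (for each layer r, every char whose count exceeds r) instead of A's repetition of a progressively suffix-dropped string driven by count differences.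
import Mathlib
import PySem

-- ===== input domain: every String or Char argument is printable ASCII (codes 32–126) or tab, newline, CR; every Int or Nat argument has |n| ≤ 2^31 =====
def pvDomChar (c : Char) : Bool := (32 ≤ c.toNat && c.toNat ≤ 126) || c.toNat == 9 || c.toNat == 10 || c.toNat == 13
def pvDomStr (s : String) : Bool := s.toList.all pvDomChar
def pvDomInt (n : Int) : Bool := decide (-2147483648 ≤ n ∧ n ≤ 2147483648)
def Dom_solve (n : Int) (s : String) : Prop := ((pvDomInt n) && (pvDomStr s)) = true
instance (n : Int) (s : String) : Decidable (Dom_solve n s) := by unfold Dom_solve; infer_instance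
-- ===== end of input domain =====

-- B rebuilds the output row-by-row (for each layer r, emit every char whose count exceeds r)
-- instead of A's suffix-dropping repetition of a shrinking string; objective: simpler decomposition.

-- ===== PORT A =====
def solve (n : Int) (s : String) : String :=
  let dict_char := s.toList.foldl
    (fun (d : PySem.Dict Char Int) c => (d.setdefault c 0).modify c 0 (· + 1)) PySem.Dict.empty
  let list_char := PySem.List.sorted dict_char.items (fun x => x.2)
  let temp_string := PySem.Chars.join [] (list_char.map (fun x => [x.1]))
  -- state (result, temp_string, cur_count); strings handled on the List Char side (exact)
  String.ofList
    ((PySem.List.pyRange 0 (list_char.length : Int)).foldl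
      (fun (st : List Char × List Char × Int) i =>
        (st.1 ++ PySem.List.pyRepeat st.2.1 ((PySem.List.pyGetD list_char i (' ', 0)).2 - st.2.2),
         PySem.List.slice st.2.1 (some 1) none,
         (PySem.List.pyGetD list_char i (' ', 0)).2))
      ([], temp_string, 0)).1

-- ===== PORT B =====
def solve_alt (n : Int) (s : String) : String :=
  let counts := s.toList.foldl
    (fun (d : PySem.Dict Char Int) c => d.insert c (d.getD c 0 + 1)) PySem.Dict.empty
  let pairs := PySem.List.sorted counts.items (fun kv => kv.2)
  let maxc : Int := if pairs.isEmpty then 0 else (PySem.List.pyGetD pairs (-1) (' ', 0)).2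
  String.ofList
    ((PySem.List.pyRange 0 maxc).foldl
      (fun acc r => pairs.foldl (fun acc p => if p.2 > r then acc ++ [p.1] else acc) acc) [])

-- ===== PRECONDITION & SPEC =====
def Spec_solve (n : Int) (s : String) (out : String) : Prop := out = solve_alt n s
instance (n : Int) (s : String) (out : String) : Decidable (Spec_solve n s out) := by unfold Spec_solve; infer_instance

-- ===== CLAIM (what is proved, stated in full; the proofs are below) =====
def Claim_equal_solve : Prop := ∀ (n : Int) (s : String), Dom_solve n s → Spec_solve n s (solve n s)

-- ===== LEMMAS AND PROOFS =====

-- A's counting step (setdefault then += 1) is B's counting step (insert of get+1), as dicts.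
lemma step_eq (d : PySem.Dict Char Int) (c : Char) :
    (d.setdefault c 0).modify c 0 (· + 1) = d.insert c (d.getD c 0 + 1) := by
  cases hc : d.contains c with
  | true => rw [PySem.Dict.setdefault_of_contains _ _ hc]; rfl
  | false =>
    rw [PySem.Dict.setdefault_of_not_contains _ _ hc]
    have hkeys : ∀ p ∈ d.items, (p.1 == c) = false := by
      intro p hp
      have := (List.any_eq_false).1 hc p hp
      simpa using this
    have hget : d.getD c 0 = 0 := by
      have : d.get? c = none := (PySem.Dict.get?_eq_none_iff_contains d c).2 hc
      simp [PySem.Dict.getD, this]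
    apply PySem.Dict.ext
    simp only [PySem.Dict.modify, PySem.Dict.getD_insert_self, hget]
    simp only [PySem.Dict.insert, PySem.Dict.contains]
    have hc' : (d.items.any fun p => p.1 == c) = false := hc
    simp only [hc', Bool.false_eq_true, if_false]
    have hany : ((d.items ++ [(c, (0:Int))]).any fun p => p.1 == c) = true := by
      simp [List.any_append]
    simp only [hany, if_true, List.map_append]
    have hmap : d.items.map (fun p => if (p.1 == c) = true then (c, (0:Int) + 1) else p)
        = d.items := by
      calc d.items.map (fun p => if (p.1 == c) = true then (c, (0:Int)+1) else p)
          = d.items.map id := List.map_congr_left (by intro p hp; simp [hkeys p hp])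
        _ = d.items := List.map_id _
    rw [hmap]
    simp

lemma getD_nonneg (d : PySem.Dict Char Int) (c : Char)
    (h : ∀ p ∈ d.items, (0:Int) < p.2) : 0 ≤ d.getD c 0 := by
  cases hf : List.find? (fun p => p.1 == c) d.items with
  | none => simp [PySem.Dict.getD, PySem.Dict.get?, hf]
  | some q =>
    have hq : q ∈ d.items := List.mem_of_find?_eq_some hf
    have := h q hq
    simp [PySem.Dict.getD, PySem.Dict.get?, hf]
    omega

lemma mem_items_insert (d : PySem.Dict Char Int) (k : Char) (v : Int) (p : Char × Int)
    (hp : p ∈ (d.insert k v).items) : p ∈ d.items ∨ p = (k, v) := by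
  simp only [PySem.Dict.insert] at hp
  split at hp
  · rcases List.mem_map.1 hp with ⟨q, hq, rfl⟩
    split
    · right; rfl
    · left; exact hq
  · rcases List.mem_append.1 hp with h | h
    · left; exact h
    · right; simpa using h

-- every value of the counting dict is positive
lemma counts_pos (cs : List Char) (d : PySem.Dict Char Int)
    (h : ∀ p ∈ d.items, (0:Int) < p.2) :
    ∀ p ∈ (cs.foldl (fun (d : PySem.Dict Char Int) c => d.insert c (d.getD c 0 + 1)) d).items,
      (0:Int) < p.2 := by
  induction cs generalizing d with
  | nil => simpa using h
  | cons c cs ih =>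
    simp only [List.foldl_cons]
    apply ih
    intro p hp
    rcases mem_items_insert _ _ _ _ hp with h' | rfl
    · exact h p h'
    · have := getD_nonneg d c h
      simp; omega

-- last element of a ≤-sorted list bounds all elements
lemma le_getLast (L : List (Char × Int)) (hs : L.Pairwise (fun a b => a.2 ≤ b.2))
    (h : L ≠ []) : ∀ p ∈ L, p.2 ≤ (L.getLast h).2 := by
  induction L with
  | nil => cases h rfl
  | cons x t ih =>
    intro p hp
    cases t with
    | nil => simp at hp; simp [hp]
    | cons y u =>
      rw [List.getLast_cons (by simp)]
      rcases List.mem_cons.1 hp with rfl | hp'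
      · exact le_trans ((List.pairwise_cons.1 hs).1 _ (List.getLast_mem _))
          (le_refl _)
      · exact ih (List.pairwise_cons.1 hs).2 (by simp) p hp'

lemma pyGetD_neg_one (L : List (Char × Int)) (h : L ≠ []) (dflt : Char × Int) :
    PySem.List.pyGetD L (-1) dflt = L.getLast h := by
  have hn : 0 < L.length := List.length_pos_iff.2 h
  simp only [PySem.List.pyGetD, PySem.List.pyGet?, PySem.List.pyIdx?]
  have h1 : ¬ ((0:Int) ≤ -1) := by omega
  have h2 : -(L.length : Int) ≤ -1 := by omega
  simp only [h1, if_false, h2, if_true]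
  norm_num
  rw [List.getLast_eq_getElem]
  simp [List.getElem?_eq_getElem (show L.length - 1 < L.length by omega)]

lemma foldl_const_append {β : Type} (l : List β) (M acc : List Char) :
    l.foldl (fun a _ => a ++ M) acc = acc ++ (List.replicate l.length M).flatten := by
  induction l generalizing acc with
  | nil => simp
  | cons x t ih => simp [ih, List.replicate_succ]

lemma row_all (r : Int) (L : List (Char × Int)) (a : List Char)
    (h : ∀ p ∈ L, r < p.2) :
    L.foldl (fun a p => if p.2 > r then a ++ [p.1] else a) a = a ++ L.map Prod.fst := by
  induction L generalizing a with
  | nil => simp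
  | cons x t ih =>
    simp only [List.foldl_cons, if_pos (h x (by simp))]
    rw [ih _ (fun p hp => h p (by simp [hp]))]
    simp

-- the heart: A's suffix-repetition loop equals B's row loop, for any sorted segment
lemma weave (L : List (Char × Int)) (prev maxc : Int) (acc : List Char)
    (hs : L.Pairwise (fun a b => a.2 ≤ b.2))
    (hlb : ∀ p ∈ L, prev ≤ p.2)
    (hub : ∀ p ∈ L, p.2 ≤ maxc)
    (hlast : (L = [] ∧ maxc ≤ prev) ∨ (∃ h : L ≠ [], maxc = (L.getLast h).2)) :
    (L.foldl (fun (st : List Char × List Char × Int) p =>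
        (st.1 ++ PySem.List.pyRepeat st.2.1 (p.2 - st.2.2), st.2.1.tail, p.2))
      (acc, L.map Prod.fst, prev)).1
    = (PySem.List.pyRange prev maxc).foldl
        (fun a r => L.foldl (fun a p => if p.2 > r then a ++ [p.1] else a) a) acc := by
  induction L generalizing prev acc with
  | nil =>
    rcases hlast with ⟨-, hle⟩ | ⟨h, -⟩
    · rw [PySem.List.pyRange_one_eq_nil hle]; rfl
    · cases h rfl
  | cons x t ih =>
    obtain ⟨c, v⟩ := x
    have hpv : prev ≤ v := hlb (c, v) (by simp)
    have hvmax : v ≤ maxc := hub (c, v) (by simp)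
    have hpair := List.pairwise_cons.1 hs
    -- left side: one step, then the IH state
    have lhs_eq :
        ((((c, v) :: t).foldl (fun (st : List Char × List Char × Int) p =>
            (st.1 ++ PySem.List.pyRepeat st.2.1 (p.2 - st.2.2), st.2.1.tail, p.2))
          (acc, ((c, v) :: t).map Prod.fst, prev))).1
        = (t.foldl (fun (st : List Char × List Char × Int) p =>
            (st.1 ++ PySem.List.pyRepeat st.2.1 (p.2 - st.2.2), st.2.1.tail, p.2))
          (acc ++ PySem.List.pyRepeat (((c, v) :: t).map Prod.fst) (v - prev),
           t.map Prod.fst, v)).1 := by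
      simp
    rw [lhs_eq]
    have hlast' : (t = [] ∧ maxc ≤ v) ∨ (∃ h : t ≠ [], maxc = (t.getLast h).2) := by
      cases t with
      | nil =>
        left
        refine ⟨rfl, ?_⟩
        rcases hlast with ⟨h, -⟩ | ⟨h, hm⟩
        · cases h
        · simp at hm; omega
      | cons y u =>
        right
        refine ⟨by simp, ?_⟩
        rcases hlast with ⟨h, -⟩ | ⟨h, hm⟩
        · cases h
        · rw [hm, List.getLast_cons (by simp)]
    rw [ih _ _ hpair.2 (fun p hp => hpair.1 p hp) (fun p hp => hub p (by simp [hp])) hlast']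
    -- right side: split the row range at v
    rw [PySem.List.pyRange_one_append prev v maxc hpv hvmax, List.foldl_append]
    -- rows below v print the whole remaining string
    have seg1 : (PySem.List.pyRange prev v).foldl
        (fun a r => ((c, v) :: t).foldl (fun a p => if p.2 > r then a ++ [p.1] else a) a) acc
        = acc ++ PySem.List.pyRepeat (((c, v) :: t).map Prod.fst) (v - prev) := by
      refine (List.foldl_ext _ (fun a (_ : Int) => a ++ ((c, v) :: t).map Prod.fst) acc ?_).trans ?_
      · intro a r hr
        have hrv : r < v := (PySem.List.mem_pyRange_one.1 hr).2
        exact row_all r _ a (by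
          intro p hp
          rcases List.mem_cons.1 hp with rfl | hp'
          · exact hrv
          · exact lt_of_lt_of_le hrv (hpair.1 p hp'))
      · rw [foldl_const_append, PySem.List.length_pyRange_one]
        simp [PySem.List.pyRepeat]
    rw [seg1]
    -- rows from v on skip the head
    apply Eq.symm
    apply List.foldl_ext
    intro a r hr
    have hvr : v ≤ r := (PySem.List.mem_pyRange_one.1 hr).1
    simp only [List.foldl_cons]
    rw [if_neg (by omega)]

-- the two counting folds build the same dict
lemma dicts_eq (cs : List Char) :
    cs.foldl (fun (d : PySem.Dict Char Int) c => (d.setdefault c 0).modify c 0 (· + 1))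
        PySem.Dict.empty
    = cs.foldl (fun (d : PySem.Dict Char Int) c => d.insert c (d.getD c 0 + 1))
        PySem.Dict.empty :=
  List.foldl_ext _ _ _ (fun d c _ => step_eq d c)

-- ===== VERDICT (by name: the statement is the Claim_ definition above) =====
theorem solve_spec : Claim_equal_solve := by
  intro n s _
  unfold Spec_solve solve solve_alt
  rw [dicts_eq]
  dsimp only
  set d := s.toList.foldl (fun (d : PySem.Dict Char Int) c => d.insert c (d.getD c 0 + 1))
      PySem.Dict.empty with hd
  set L := PySem.List.sorted d.items (fun x => x.2) with hL
  have hmap : L.map (fun x => [x.1]) = (L.map Prod.fst).map (fun c => [c]) := by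
    simp [List.map_map]
  rw [hmap, PySem.Chars.join_nil_singletons]
  rw [PySem.List.foldl_pyRange_zero_pyGetD' L (' ', 0)
        (fun (st : List Char × List Char × Int) x =>
          (st.1 ++ PySem.List.pyRepeat st.2.1 (x.2 - st.2.2),
           PySem.List.slice st.2.1 (some 1) none, x.2))]
  simp only [PySem.List.slice_from_one]
  congr 1
  have hpos : ∀ p ∈ L, (0:Int) < p.2 := by
    intro p hp
    exact counts_pos s.toList PySem.Dict.empty (by simp [PySem.Dict.empty]) p
      ((PySem.List.mem_sorted _ _ _ _).1 hp)
  have hs : L.Pairwise (fun a b => a.2 ≤ b.2) := PySem.List.sorted_pairwise _ _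
  cases hLe : L.isEmpty with
  | true =>
    have : L = [] := by simpa [List.isEmpty_iff] using hLe
    rw [if_pos rfl]
    exact weave L 0 0 [] hs (by intro p hp; simp [this] at hp)
      (by intro p hp; simp [this] at hp) (Or.inl ⟨this, le_refl 0⟩)
  | false =>
    have hne : L ≠ [] := by simpa [List.isEmpty_iff] using hLe
    rw [if_neg (by simp)]
    rw [pyGetD_neg_one L hne]
    exact weave L 0 ((L.getLast hne).2) [] hs
      (fun p hp => le_of_lt (hpos p hp))
      (le_getLast L hs hne)
      (Or.inr ⟨hne, rfl⟩)
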